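-- pv_equiv track=rewrite | github.com/MrBrantCode/unitest_baseline | mut_generate/mist_train_cf/cf_88542/solution.py | reverse_and_remove_duplicates
-- ===== SOURCE A (Python) =====
-- def reverse_and_remove_duplicates(nums):
--     seen = set()
--     result = []
--
--     for num in reversed(nums):
--         if num >= 0 and num not in seen:
--             seen.add(num)
--             result.append(num)
--
--     return result
-- ===== SOURCE B (Python) =====
-- def reverse_and_remove_duplicates(nums):
--     # One forward pass: keep each non-negative value at its last occurrence
--     # (pop + reinsert moves it to the end of the dict), then read keys backwards.
--     d = {}
--     for num in nums:
--         if num >= 0: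
--             d.pop(num, None)
--             d[num] = None
--     return list(reversed(d))
-- ===== Notes on version B (the rewrite author's own statement) =====
-- stated objective: alternative
-- what changed: Instead of scanning reversed(nums) with a seen-set and appending first-seen non-negatives, B makes one forward pass that moves each non-negative value to the end of an insertion-ordered dict (pop + reinsert keeps the last occurrence) and then reads the dict's keys backwards.
import Mathlib
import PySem

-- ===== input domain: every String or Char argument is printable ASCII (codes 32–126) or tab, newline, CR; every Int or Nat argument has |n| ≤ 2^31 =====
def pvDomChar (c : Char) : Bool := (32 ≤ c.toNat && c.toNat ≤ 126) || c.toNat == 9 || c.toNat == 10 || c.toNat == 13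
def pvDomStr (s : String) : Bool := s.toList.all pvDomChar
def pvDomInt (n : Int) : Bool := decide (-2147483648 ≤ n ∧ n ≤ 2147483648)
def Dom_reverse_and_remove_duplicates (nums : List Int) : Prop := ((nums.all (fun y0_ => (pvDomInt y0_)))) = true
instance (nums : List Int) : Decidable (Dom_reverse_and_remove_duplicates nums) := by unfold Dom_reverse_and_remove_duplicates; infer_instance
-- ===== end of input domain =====

-- ===== PORT A =====
-- B differs from A: one forward pass moving each non-negative value to the end of a dict,
-- read backwards, instead of A's backward scan with a seen-set (objective: alternative).

-- A's loop: 'for num in reversed(nums): if num >= 0 and num not in seen: seen.add(num); result.append(num)'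
def pvLoopA (seen : PySem.Set Int) (result : List Int) : List Int → List Int
  | [] => result
  | n :: rest =>
    if 0 ≤ n ∧ PySem.Set.contains seen n = false then
      pvLoopA (PySem.Set.add seen n) (result ++ [n]) rest
    else
      pvLoopA seen result rest

def reverse_and_remove_duplicates (nums : List Int) : List Int :=
  pvLoopA PySem.Set.empty [] nums.reverse

-- ===== PORT B =====
-- B's loop body: 'if num >= 0: d.pop(num, None); d[num] = None'  (value None ported as Unit)
def pvStepB (d : PySem.Dict Int Unit) (n : Int) : PySem.Dict Int Unit :=
  if 0 ≤ n then (d.erase n).insert n () else d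

def reverse_and_remove_duplicates_alt (nums : List Int) : List Int :=
  (PySem.Dict.keys (nums.foldl pvStepB PySem.Dict.empty)).reverse

-- ===== PRECONDITION & SPEC =====
def Spec_reverse_and_remove_duplicates (nums : List Int) (out : List Int) : Prop := out = reverse_and_remove_duplicates_alt nums
instance (nums : List Int) (out : List Int) : Decidable (Spec_reverse_and_remove_duplicates nums out) := by unfold Spec_reverse_and_remove_duplicates; infer_instance

-- ===== CLAIM (what is proved, stated in full; the proofs are below) =====
def Claim_equal_reverse_and_remove_duplicates : Prop := ∀ (nums : List Int), Dom_reverse_and_remove_duplicates nums → Spec_reverse_and_remove_duplicates nums (reverse_and_remove_duplicates nums)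

-- ===== LEMMAS AND PROOFS =====

-- the accumulator can be pulled out of A's loop
theorem pvLoopA_acc (l : List Int) (seen : PySem.Set Int) (res : List Int) :
    pvLoopA seen res l = res ++ pvLoopA seen [] l := by
  induction l generalizing seen res with
  | nil => simp [pvLoopA]
  | cons n rest ih =>
    by_cases h : 0 ≤ n ∧ PySem.Set.contains seen n = false
    · simp only [pvLoopA, if_pos h]
      rw [ih _ (res ++ [n]), ih _ ([] ++ [n])]
      simp
    · simp only [pvLoopA, if_neg h]
      exact ih _ res

theorem contains_add_eq (s : PySem.Set Int) (x m : Int) :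
    PySem.Set.contains (PySem.Set.add s x) m = (m == x || PySem.Set.contains s m) := by
  by_cases hmem : x ∈ s
  · by_cases hm : m = x
    · subst hm
      simp [PySem.Set.add, PySem.Set.contains, hmem]
    · simp [PySem.Set.add, PySem.Set.contains, hmem, hm]
  · by_cases hm : m = x
    · subst hm
      simp [PySem.Set.add, PySem.Set.contains, hmem]
    · simp [PySem.Set.add, PySem.Set.contains, hmem, hm]

-- A's loop only looks at MEMBERSHIP of the seen set
theorem pvLoopA_congr (l : List Int) (s t : PySem.Set Int)
    (h : ∀ n, PySem.Set.contains s n = PySem.Set.contains t n) (res : List Int) :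
    pvLoopA s res l = pvLoopA t res l := by
  induction l generalizing s t res with
  | nil => rfl
  | cons n rest ih =>
    have hadd : ∀ m, PySem.Set.contains (PySem.Set.add s n) m = PySem.Set.contains (PySem.Set.add t n) m := by
      intro m
      rw [contains_add_eq, contains_add_eq, h m]
    by_cases hc : 0 ≤ n ∧ PySem.Set.contains s n = false
    · rw [pvLoopA, if_pos hc, pvLoopA, if_pos (by rw [← h]; exact hc), ih _ _ hadd]
    · rw [pvLoopA, if_neg hc, pvLoopA, if_neg (by rw [← h]; exact hc), ih _ _ h]

-- enlarging the seen set by one element filters that element out of the output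
theorem pvLoopA_add_filter (l : List Int) (s : PySem.Set Int) (x : Int) :
    pvLoopA (PySem.Set.add s x) [] l = (pvLoopA s [] l).filter (fun n => !(n == x)) := by
  induction l generalizing s with
  | nil => rfl
  | cons n rest ih =>
    by_cases hn : 0 ≤ n
    · cases hsn : PySem.Set.contains s n with
      | true =>
        have hmem : n ∈ s := by simpa [PySem.Set.contains] using hsn
        rw [pvLoopA, if_neg (by rw [contains_add_eq]; simp [hmem]),
            pvLoopA, if_neg (by simp [hmem])]
        exact ih s
      | false =>
        have hnm : n ∉ s := by simpa [PySem.Set.contains] using hsn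
        by_cases hx : n = x
        · subst hx
          rw [pvLoopA, if_neg (by rw [contains_add_eq]; simp),
              pvLoopA, if_pos ⟨hn, hsn⟩, pvLoopA_acc rest (PySem.Set.add s n) ([] ++ [n]), ih]
          simp [List.filter_filter]
        · have hxb : (n == x) = false := by simpa using hx
          rw [pvLoopA, if_pos ⟨hn, by rw [contains_add_eq]; simp [hxb, hnm]⟩,
              pvLoopA, if_pos ⟨hn, hsn⟩,
              pvLoopA_acc rest (PySem.Set.add (PySem.Set.add s x) n) ([] ++ [n]),
              pvLoopA_acc rest (PySem.Set.add s n) ([] ++ [n]),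
              pvLoopA_congr rest (PySem.Set.add (PySem.Set.add s x) n)
                (PySem.Set.add (PySem.Set.add s n) x)
                (by intro m
                    rw [contains_add_eq, contains_add_eq, contains_add_eq, contains_add_eq]
                    rw [Bool.or_left_comm]),
              ih (PySem.Set.add s n)]
          simp [hxb]
    · rw [pvLoopA, if_neg (fun h => hn h.1), pvLoopA, if_neg (fun h => hn h.1)]
      exact ih s

-- keys after B's pop-then-reinsert step
theorem keys_stepB (d : PySem.Dict Int Unit) (x : Int) (hx : 0 ≤ x) :
    PySem.Dict.keys (pvStepB d x) = (PySem.Dict.keys d).filter (fun k => !(k == x)) ++ [x] := by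
  have hnc : (d.erase x).contains x = false := by
    simp [PySem.Dict.erase, PySem.Dict.contains, List.any_filter]
  rw [pvStepB, if_pos hx]
  simp only [PySem.Dict.keys, PySem.Dict.items_insert_of_not_contains _ _ hnc, List.map_append,
    List.map_cons, List.map_nil]
  congr 1
  simp only [PySem.Dict.erase]
  rw [List.filter_map]
  rfl

theorem main_eq (nums : List Int) :
    reverse_and_remove_duplicates nums = reverse_and_remove_duplicates_alt nums := by
  induction nums using List.reverseRecOn with
  | nil => rfl
  | append_singleton xs x ih =>
    unfold reverse_and_remove_duplicates reverse_and_remove_duplicates_alt at *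
    rw [List.reverse_append, List.foldl_append]
    simp only [List.reverse_cons, List.reverse_nil, List.nil_append, List.cons_append,
      List.foldl_cons, List.foldl_nil]
    by_cases hx : 0 ≤ x
    · rw [pvLoopA, if_pos ⟨hx, rfl⟩, pvLoopA_acc, pvLoopA_add_filter]
      rw [keys_stepB _ _ hx, List.reverse_append, ← List.filter_reverse, ih]
      simp
    · rw [pvLoopA, if_neg (fun h => hx h.1), pvStepB, if_neg hx]
      exact ih

-- ===== VERDICT (by name: the statement is the Claim_ definition above) =====
theorem reverse_and_remove_duplicates_spec : Claim_equal_reverse_and_remove_duplicates := by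
  intro nums _
  unfold Spec_reverse_and_remove_duplicates
  exact main_eq nums
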